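-- pv_equiv track=rewrite | github.com/Ensembl/amr_genotypes | src/utils.py | bin_from_range_extended
-- ===== SOURCE A (Python) =====
-- _binFirstShift = 17
--
-- _binNextShift = 3
--
-- _binOffsetOldToExtended = 4681
--
-- binOffsetsExtended = [
--     4096 + 512 + 64 + 8 + 1,
--     512 + 64 + 8 + 1,
--     64 + 8 + 1,
--     8 + 1,
--     1,
--     0,
-- ]
--
-- def bin_from_range_extended(start: int, end: int) -> int:
--     """
--     Given start,end in chromosome coordinates, assign a bin.
--
--     There's a bin for each:
--         - 128k segment
--         - 1M segment
--         - 8M segment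
--         - 64M segment
--         - 512M segment
--         - one top-level bin for up to 4Gb
--
--     Parameters
--     ----------
--     start : int
--         Start coordinate (0-based)
--     end : int
--         End coordinate (non-inclusive)
--
--     Returns
--     -------
--     int
--         The bin index.
--
--     Raises
--     ------
--     ValueError
--         If start or end are out of range.
--     """
--     if start < 0 or end <= start:
--         raise ValueError(f"Invalid range: start={start}, end={end}")
--
--     start_bin = start >> _binFirstShift
--     end_bin = (end - 1) >> _binFirstShift
--     for offset in binOffsetsExtended:
--         if start_bin == end_bin:
--             return _binOffsetOldToExtended + offset + start_bin
--         start_bin >>= _binNextShift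
--         end_bin >>= _binNextShift
--
--     raise ValueError(f"start {start}, end {end} out of range in findBin (max is ~2Gb)")
-- ===== SOURCE B (Python) =====
-- _binOffsetOldToExtended = 4681
--
-- binOffsetsExtended = [
--     4096 + 512 + 64 + 8 + 1,
--     512 + 64 + 8 + 1,
--     64 + 8 + 1,
--     8 + 1,
--     1,
--     0,
-- ]
--
-- def bin_from_range_extended(start: int, end: int) -> int:
--     if start < 0 or end <= start:
--         raise ValueError(f"Invalid range: start={start}, end={end}")
--     start_bin = start >> 17
--     d = start_bin ^ ((end - 1) >> 17)
--     i = (d.bit_length() + 2) // 3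
--     if i > 5:
--         raise ValueError(f"start {start}, end {end} out of range in findBin (max is ~2Gb)")
--     return _binOffsetOldToExtended + binOffsetsExtended[i] + (start_bin >> (3 * i))
-- ===== Notes on version B (the rewrite author's own statement) =====
-- stated objective: simpler
-- what changed: Replaces A's 6-iteration shift-and-compare loop over the offset table by a direct closed-form computation of the bin level from the bit length of (start>>17) XOR ((end-1)>>17), followed by a single table lookup.
import Mathlib
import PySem

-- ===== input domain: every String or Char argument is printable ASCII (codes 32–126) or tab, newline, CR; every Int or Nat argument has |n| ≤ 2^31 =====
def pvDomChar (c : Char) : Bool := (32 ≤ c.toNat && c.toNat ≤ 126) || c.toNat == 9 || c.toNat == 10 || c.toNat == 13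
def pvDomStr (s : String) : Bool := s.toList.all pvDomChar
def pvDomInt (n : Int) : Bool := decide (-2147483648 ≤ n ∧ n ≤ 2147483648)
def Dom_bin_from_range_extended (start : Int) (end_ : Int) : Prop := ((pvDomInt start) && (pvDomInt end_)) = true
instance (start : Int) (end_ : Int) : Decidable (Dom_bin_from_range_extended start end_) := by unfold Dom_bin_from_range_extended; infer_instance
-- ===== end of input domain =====

-- B replaces A's 6-iteration shift loop by computing the bin level directly from the
-- bit length of (start>>17) XOR ((end-1)>>17); equivalence of return values is proved
-- on all inputs where A returns (Pre_: valid ranges).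

-- ===== PORT A =====
def binOffsetsExtended : List Int := [4096 + 512 + 64 + 8 + 1, 512 + 64 + 8 + 1, 64 + 8 + 1, 8 + 1, 1, 0]

def binLoopA : List Int → Int → Int → Int
  | [], _, _ => 0  -- Python raises ValueError "out of range" here; unreachable under Dom ∧ Pre
  | offset :: rest, start_bin, end_bin =>
    if start_bin = end_bin then 4681 + offset + start_bin
    else binLoopA rest (start_bin >>> 3) (end_bin >>> 3)

def bin_from_range_extended (start : Int) (end_ : Int) : Int :=
  if start < 0 ∨ end_ ≤ start then 0  -- Python raises ValueError "Invalid range"; excluded by Pre_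
  else binLoopA binOffsetsExtended (start >>> 17) ((end_ - 1) >>> 17)

-- ===== PORT B =====
def bin_from_range_extended_alt (start : Int) (end_ : Int) : Int :=
  if start < 0 ∨ end_ ≤ start then 0  -- Python raises ValueError "Invalid range"; excluded by Pre_
  else
    -- start ≥ 0 and end_ - 1 ≥ 0 here, so .toNat is exact and >>> / ^^^ / Nat.size
    -- match Python's >> / ^ / int.bit_length on these nonnegative ints
    let start_bin : Nat := start.toNat >>> 17
    let d : Nat := start_bin ^^^ ((end_ - 1).toNat >>> 17)
    let i : Nat := (Nat.size d + 2) / 3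
    if 5 < i then 0  -- Python raises ValueError "out of range"; unreachable under Dom
    else 4681 + binOffsetsExtended.getD i 0 + ((start_bin >>> (3 * i) : Nat) : Int)

-- ===== PRECONDITION & SPEC =====
-- Pre_ excludes exactly the inputs on which A raises ValueError: start < 0 or end ≤ start
-- (within Dom the "out of range" raise is unreachable, since (end-1)>>17 < 2^14).
def Pre_bin_from_range_extended (start : Int) (end_ : Int) : Prop := 0 ≤ start ∧ start < end_
instance (start : Int) (end_ : Int) : Decidable (Pre_bin_from_range_extended start end_) := by unfold Pre_bin_from_range_extended; infer_instance

def pvWitness_bin_from_range_extended : Int × Int := (0, 1)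

def Spec_bin_from_range_extended (start : Int) (end_ : Int) (out : Int) : Prop := out = bin_from_range_extended_alt start end_
instance (start : Int) (end_ : Int) (out : Int) : Decidable (Spec_bin_from_range_extended start end_ out) := by unfold Spec_bin_from_range_extended; infer_instance

-- ===== CLAIM (what is proved, stated in full; the proofs are below) =====
def Claim_equal_bin_from_range_extended : Prop := ∀ (start : Int) (end_ : Int), Dom_bin_from_range_extended start end_ → Pre_bin_from_range_extended start end_ → Spec_bin_from_range_extended start end_ (bin_from_range_extended start end_)

-- ===== LEMMAS AND PROOFS =====

theorem cast17 (a : ℕ) : ((a : ℤ) >>> (17 : ℤ)) = ((a >>> 17 : ℕ) : ℤ) := rfl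
theorem cast3 (a : ℕ) : ((a : ℤ) >>> (3 : ℤ)) = ((a >>> 3 : ℕ) : ℤ) := rfl
theorem shr_shr (x k l : ℕ) : x >>> k >>> l = x >>> (k + l) := (Nat.shiftRight_add x k l).symm

theorem shiftRight_xor_distrib (a b m : ℕ) : (a ^^^ b) >>> m = (a >>> m) ^^^ (b >>> m) := by
  apply Nat.eq_of_testBit_eq
  intro j
  simp [Nat.testBit_shiftRight, Nat.testBit_xor]

theorem shiftRight_eq_iff (a b m : ℕ) : a >>> m = b >>> m ↔ a ^^^ b < 2 ^ m := by
  constructor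
  · intro h
    have h0 : (a ^^^ b) >>> m = 0 := by
      rw [shiftRight_xor_distrib, h, Nat.xor_self]
    rw [Nat.shiftRight_eq_div_pow] at h0
    have hp : 0 < 2 ^ m := Nat.two_pow_pos m
    rcases Nat.div_eq_zero_iff.mp h0 with h1 | h1
    · omega
    · exact h1
  · intro h
    apply Nat.eq_of_testBit_eq
    intro j
    have hlt : a ^^^ b < 2 ^ (m + j) :=
      lt_of_lt_of_le h (Nat.pow_le_pow_right (by norm_num) (Nat.le_add_right m j))
    have hb : (a ^^^ b).testBit (m + j) = false := Nat.testBit_lt_two_pow hlt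
    rw [Nat.testBit_xor] at hb
    simp only [Nat.testBit_shiftRight]
    cases ha : a.testBit (m + j) <;> cases hc : b.testBit (m + j) <;> simp_all

theorem cond_iff (a b m : ℕ) : a >>> m = b >>> m ↔ Nat.size (a ^^^ b) ≤ m :=
  (shiftRight_eq_iff a b m).trans Nat.size_le.symm

theorem bin_from_range_extended_spec : Claim_equal_bin_from_range_extended := by
  intro start end_ hdom hpre
  obtain ⟨h0, hlt⟩ := hpre
  unfold Spec_bin_from_range_extended bin_from_range_extended bin_from_range_extended_alt
  have hng : ¬ (start < 0 ∨ end_ ≤ start) := by omega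
  rw [if_neg hng, if_neg hng]
  -- move to Nat
  obtain ⟨s, rfl⟩ : ∃ s : ℕ, start = (s : ℤ) := ⟨start.toNat, (Int.toNat_of_nonneg h0).symm⟩
  obtain ⟨e, he⟩ : ∃ e : ℕ, end_ - 1 = (e : ℤ) := ⟨(end_ - 1).toNat, (Int.toNat_of_nonneg (by omega)).symm⟩
  rw [he]
  have hse : s ≤ e := by
    have h : (s : ℤ) ≤ (e : ℤ) := by omega
    exact_mod_cast h
  have hebound : e ≤ 2147483647 := by
    have hd : end_ ≤ 2147483648 := by
      unfold Dom_bin_from_range_extended pvDomInt at hdom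
      simp only [Bool.and_eq_true, decide_eq_true_eq] at hdom
      omega
    have h : (e : ℤ) ≤ 2147483647 := by omega
    exact_mod_cast h
  simp only [binOffsetsExtended, binLoopA, cast17, cast3, Int.toNat_natCast, Nat.cast_inj,
    shr_shr]
  norm_num only
  -- name the bit length
  generalize hn : Nat.size (s >>> 17 ^^^ e >>> 17) = n
  have hsbeb : s >>> 17 ≤ e >>> 17 := by
    rw [Nat.shiftRight_eq_div_pow, Nat.shiftRight_eq_div_pow]
    exact Nat.div_le_div_right hse
  have hebb : e >>> 17 < 16384 := by
    rw [Nat.shiftRight_eq_div_pow]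
    omega
  have hn14 : n ≤ 14 := by
    rw [← hn]
    exact Nat.size_le.mpr (Nat.xor_lt_two_pow (n := 14) (lt_of_le_of_lt hsbeb hebb) hebb)
  have ck : ∀ m : ℕ, (s >>> (17 + m) = e >>> (17 + m)) ↔ n ≤ m := by
    intro m
    have h := cond_iff (s >>> 17) (e >>> 17) m
    rw [shr_shr, shr_shr, hn] at h
    exact h
  have c0 := ck 0
  have c1 := ck 3
  have c2 := ck 6
  have c3 := ck 9
  have c4 := ck 12
  have c5 := ck 15
  norm_num only at c0 c1 c2 c3 c4 c5
  simp only [c0, c1, c2, c3, c4, c5]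
  interval_cases n <;> norm_num [List.getD]
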